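-- pv_equiv track=rewrite | github.com/s0md3v/XSStrike | core/utils.py | stripper
-- ===== SOURCE A (Python) =====
-- def stripper(string, substring, direction='right'):
--     done = False
--     strippedString = ''
--     if direction == 'right':
--         string = string[::-1]
--     for char in string:
--         if char == substring and not done:
--             done = True
--         else:
--             strippedString += char
--     if direction == 'right':
--         strippedString = strippedString[::-1]
--     return strippedString
-- ===== SOURCE B (Python) =====
-- def stripper(string, substring, direction='right'):
--     # A only ever matches single characters (it compares each char to `substring`),
--     # so a multi-char or empty `substring` leaves the string unchanged.
--     if len(substring) != 1:
--         return string
--     idx = string.rfind(substring) if direction == 'right' else string.find(substring)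
--     if idx == -1:
--         return string
--     return string[:idx] + string[idx + 1:]
-- ===== Notes on version B (the rewrite author's own statement) =====
-- stated objective: faster
-- what changed: B locates the char with str.find/str.rfind and removes it by slicing (string[:idx] + string[idx+1:]) instead of A's reverse / flag-driven char loop / char-by-char rebuild / reverse.
import Mathlib
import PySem

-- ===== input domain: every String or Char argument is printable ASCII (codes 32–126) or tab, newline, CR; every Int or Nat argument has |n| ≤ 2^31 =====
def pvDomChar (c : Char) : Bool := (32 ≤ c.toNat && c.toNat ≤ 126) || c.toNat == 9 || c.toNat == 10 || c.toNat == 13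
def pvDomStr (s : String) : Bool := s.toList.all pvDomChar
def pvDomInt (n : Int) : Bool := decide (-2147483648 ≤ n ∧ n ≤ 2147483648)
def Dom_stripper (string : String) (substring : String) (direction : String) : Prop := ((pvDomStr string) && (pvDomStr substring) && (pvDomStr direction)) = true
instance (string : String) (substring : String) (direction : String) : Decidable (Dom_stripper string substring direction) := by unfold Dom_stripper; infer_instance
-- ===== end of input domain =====

-- B replaces A's reverse/flag-loop/rebuild with find/rfind plus slicing (locate-then-slice); proved equal on all inputs.


-- ===== PORT A =====
-- loop body of A: `if char == substring and not done: done = True else: strippedString += char`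
-- (Python's `char` is a 1-char string; `char == substring` is `[char] = substring.toList` on code points)
def stripStep (sub : List Char) (st : Bool × List Char) (char : Char) : Bool × List Char :=
  if [char] = sub ∧ st.1 = false then (true, st.2) else (st.1, st.2 ++ [char])

def stripper (string : String) (substring : String) (direction : String) : String :=
  -- if direction == 'right': string = string[::-1]   (s[::-1]: slice? with step -1; step ≠ 0 so `some`, getD is a totality guard)
  let s : List Char :=
    if direction = "right" then (PySem.List.slice? string.toList none none (-1)).getD string.toList
    else string.toList
  -- done = False; strippedString = ''; for char in string: …
  let r := s.foldl (stripStep substring.toList) (false, ([] : List Char))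
  -- if direction == 'right': strippedString = strippedString[::-1]
  let out := if direction = "right" then (PySem.List.slice? r.2 none none (-1)).getD r.2 else r.2
  String.ofList out

-- ===== PORT B =====
def stripper_alt (string : String) (substring : String) (direction : String) : String :=
  if PySem.Str.len substring ≠ 1 then string
  else
    let idx := if direction = "right" then PySem.Str.rfind string substring
               else PySem.Str.find string substring
    if idx = -1 then string
    else String.ofList (PySem.List.slice string.toList none (some idx) ++
                        PySem.List.slice string.toList (some (idx + 1)) none)

-- ===== PRECONDITION & SPEC =====
def Spec_stripper (string : String) (substring : String) (direction : String) (out : String) : Prop := out = stripper_alt string substring direction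
instance (string : String) (substring : String) (direction : String) (out : String) : Decidable (Spec_stripper string substring direction out) := by unfold Spec_stripper; infer_instance

-- ===== CLAIM (what is proved, stated in full; the proofs are below) =====
def Claim_equal_stripper : Prop := ∀ (string : String) (substring : String) (direction : String), Dom_stripper string substring direction → Spec_stripper string substring direction (stripper string substring direction)

-- ===== LEMMAS AND PROOFS =====

-- what A's loop computes when started with done = False: remove the first char equal to sub
def rmFirst (sub : List Char) : List Char → List Char
  | [] => []
  | c :: t => if [c] = sub then t else c :: rmFirst sub t

theorem foldl_stripStep_true (sub : List Char) (s acc : List Char) :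
    s.foldl (stripStep sub) (true, acc) = (true, acc ++ s) := by
  induction s generalizing acc with
  | nil => simp
  | cons c t ih => simp [stripStep, ih]

theorem foldl_stripStep_false (sub : List Char) (s acc : List Char) :
    (s.foldl (stripStep sub) (false, acc)).2 = acc ++ rmFirst sub s := by
  induction s generalizing acc with
  | nil => simp [rmFirst]
  | cons c t ih =>
    by_cases h : [c] = sub
    · simp [stripStep, h, rmFirst, foldl_stripStep_true]
    · simp [stripStep, h, rmFirst, ih]

theorem rmFirst_of_no_match (sub s : List Char) (h : ∀ c ∈ s, [c] ≠ sub) :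
    rmFirst sub s = s := by
  induction s with
  | nil => rfl
  | cons c t ih =>
    simp only [rmFirst, if_neg (h c (by simp))]
    rw [ih (fun d hd => h d (by simp [hd]))]

theorem singleton_prefix_drop (ch : Char) (s : List Char) (i : Nat) :
    [ch] <+: s.drop i ↔ s[i]? = some ch := by
  constructor
  · rintro ⟨t, ht⟩
    have h0 : (s.drop i)[0]? = some ch := by rw [← ht]; simp
    simpa using h0
  · intro h
    obtain ⟨hlt, hv⟩ := List.getElem?_eq_some_iff.mp h
    rw [List.drop_eq_getElem_cons hlt, hv]
    exact ⟨s.drop (i + 1), rfl⟩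

theorem rmFirst_eq_take_drop (ch : Char) (s : List Char) (k : Nat)
    (hk : s[k]? = some ch) (hmin : ∀ i < k, s[i]? ≠ some ch) :
    rmFirst [ch] s = s.take k ++ s.drop (k + 1) := by
  induction s generalizing k with
  | nil => simp at hk
  | cons c t ih =>
    cases k with
    | zero =>
      simp at hk
      simp [rmFirst, hk]
    | succ k =>
      have hne : c ≠ ch := by
        have := hmin 0 (by omega); simpa using this
      simp only [List.getElem?_cons_succ] at hk
      have hmin' : ∀ i < k, t[i]? ≠ some ch := by
        intro i hi
        have := hmin (i + 1) (by omega); simpa using this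
      rw [show rmFirst [ch] (c :: t) = if [c] = [ch] then t else c :: rmFirst [ch] t from rfl,
        if_neg (by simp [hne]), ih k hk hmin']
      simp

-- [ch] is an infix iff ch is a member
theorem singleton_infix_iff (ch : Char) (s : List Char) : [ch] <:+: s ↔ ch ∈ s := by
  rw [← PySem.Chars.isIn_iff_infix, ← PySem.Chars.exists_prefix_drop_iff_isIn]
  simp only [singleton_prefix_drop]
  constructor
  · rintro ⟨j, hj⟩; exact List.mem_of_getElem? hj
  · intro h
    obtain ⟨i, hi, rfl⟩ := List.getElem_of_mem h
    exact ⟨i, by simp [List.getElem?_eq_getElem hi]⟩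

-- rfind.go characterization (induction on the scan counter; no library lemma exists for rfind)
theorem rfind_go_zero (s sub : List Char) :
    PySem.Chars.rfind.go s sub 0 = if sub.isPrefixOf s then 0 else -1 := rfl

theorem rfind_go_succ (s sub : List Char) (k : Nat) :
    PySem.Chars.rfind.go s sub (k + 1) =
      if sub.isPrefixOf (s.drop (k + 1)) then ((k : Int) + 1) else PySem.Chars.rfind.go s sub k := rfl

theorem rfind_go_neg (s sub : List Char) (k : Nat)
    (h : ∀ j ≤ k, ¬ sub <+: s.drop j) : PySem.Chars.rfind.go s sub k = -1 := by
  induction k with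
  | zero =>
    rw [rfind_go_zero, if_neg]
    simpa [List.isPrefixOf_iff_prefix] using h 0 (by omega)
  | succ k ih =>
    rw [rfind_go_succ, if_neg, ih (fun j hj => h j (by omega))]
    simpa [List.isPrefixOf_iff_prefix] using h (k + 1) (by omega)

theorem rfind_go_found (s sub : List Char) (k j : Nat)
    (hp : sub <+: s.drop j) (hjk : j ≤ k)
    (hmax : ∀ i, j < i → i ≤ k → ¬ sub <+: s.drop i) :
    PySem.Chars.rfind.go s sub k = (j : Int) := by
  induction k with
  | zero =>
    have hj0 : j = 0 := by omega
    subst hj0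
    rw [rfind_go_zero, if_pos]
    · norm_num
    · rw [List.isPrefixOf_iff_prefix]; simpa using hp
  | succ k ih =>
    by_cases hj : j = k + 1
    · subst hj
      rw [rfind_go_succ, if_pos]
      · norm_num
      · rw [List.isPrefixOf_iff_prefix]; exact hp
    · have hjk' : j ≤ k := by omega
      rw [rfind_go_succ, if_neg, ih hjk' (fun i h1 h2 => hmax i h1 (by omega))]
      simpa [List.isPrefixOf_iff_prefix] using hmax (k + 1) (by omega) (by omega)

-- existence of a last occurrence
theorem exists_last_occ (ch : Char) (s : List Char) (h : ch ∈ s) :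
    ∃ k : Nat, s[k]? = some ch ∧ ∀ i : Nat, k < i → s[i]? ≠ some ch := by
  induction s using List.reverseRecOn with
  | nil => simp at h
  | append_singleton t c ih =>
    by_cases hc : c = ch
    · refine ⟨t.length, by simp [hc], ?_⟩
      intro i hi
      have hnone : (t ++ [c])[i]? = none := List.getElem?_eq_none (by simp; omega)
      simp [hnone]
    · have hm : ch ∈ t := by
        rcases List.mem_append.mp h with h1 | h1
        · exact h1
        · simp at h1; exact absurd h1.symm hc
      obtain ⟨k, hk, hmax⟩ := ih hm
      have hklt : k < t.length := (List.getElem?_eq_some_iff.mp hk).1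
      refine ⟨k, by rw [List.getElem?_append_left hklt]; exact hk, ?_⟩
      intro i hi heq
      by_cases hit : i < t.length
      · rw [List.getElem?_append_left hit] at heq; exact hmax i hi heq
      · have hil : i < t.length + 1 := by
          have := (List.getElem?_eq_some_iff.mp heq).1
          simpa [List.length_append] using this
        have : i = t.length := by omega
        subst this
        rw [List.getElem?_concat_length] at heq
        exact hc (by simpa using heq)

-- core list-level fact, left direction
theorem left_core (ch : Char) (s : List Char) (k : Nat)
    (hk : s[k]? = some ch) (hmin : ∀ i < k, s[i]? ≠ some ch) :
    rmFirst [ch] s = s.take k ++ s.drop (k + 1) :=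
  rmFirst_eq_take_drop ch s k hk hmin

-- core list-level fact, right direction: strip-first on the reverse, reversed back
theorem right_core (ch : Char) (s : List Char) (k : Nat)
    (hk : s[k]? = some ch) (hmax : ∀ i, k < i → s[i]? ≠ some ch) :
    (rmFirst [ch] s.reverse).reverse = s.take k ++ s.drop (k + 1) := by
  have hklt : k < s.length := (List.getElem?_eq_some_iff.mp hk).1
  have hm : s.length - 1 - k < s.length := by omega
  have hrev : s.reverse[s.length - 1 - k]? = some ch := by
    rw [List.getElem?_reverse (by simpa using hm),
      show s.length - 1 - (s.length - 1 - k) = k by omega]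
    exact hk
  have hrmin : ∀ i < s.length - 1 - k, s.reverse[i]? ≠ some ch := by
    intro i hi
    rw [List.getElem?_reverse (by omega)]
    exact hmax (s.length - 1 - i) (by omega)
  rw [rmFirst_eq_take_drop ch s.reverse (s.length - 1 - k) hrev hrmin]
  rw [List.reverse_append, List.drop_reverse, List.take_reverse]
  simp only [List.reverse_reverse]
  rw [show s.length - (s.length - 1 - k + 1) = k by omega,
      show s.length - (s.length - 1 - k) = k + 1 by omega]

-- A's value, as a function of rmFirst
theorem stripper_eval (string substring direction : String) :
    stripper string substring direction =
      if direction = "right"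
      then String.ofList (rmFirst substring.toList string.toList.reverse).reverse
      else String.ofList (rmFirst substring.toList string.toList) := by
  by_cases hd : direction = "right" <;>
    simp [stripper, hd, PySem.List.slice?_none_none_neg_one, foldl_stripStep_false,
      -List.foldl_reverse]

-- ===== VERDICT (by name: the statement is the Claim_ definition above) =====
theorem stripper_spec : Claim_equal_stripper := by
  intro string substring direction _
  unfold Spec_stripper
  rw [stripper_eval]
  by_cases hlen : substring.toList.length = 1
  · obtain ⟨ch, hch⟩ := List.length_eq_one_iff.mp hlen
    rw [stripper_alt, if_neg (show ¬(PySem.Str.len substring ≠ 1) by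
      rw [PySem.Str.len_eq]; omega)]
    by_cases hmem : ch ∈ string.toList
    · by_cases hd : direction = "right"
      · -- right: rfind finds the last occurrence
        obtain ⟨k, hk, hmax⟩ := exists_last_occ ch string.toList hmem
        have hklt : k < string.toList.length := (List.getElem?_eq_some_iff.mp hk).1
        have hrf : PySem.Str.rfind string substring = (k : Int) := by
          rw [PySem.Str.rfind_eq, hch, PySem.Chars.rfind]
          exact rfind_go_found _ _ _ k ((singleton_prefix_drop ch _ k).mpr hk) (by omega)
            (fun i h1 _ => fun hp => hmax i h1 ((singleton_prefix_drop ch _ i).mp hp))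
        simp only [hd, if_pos, hrf]
        rw [if_neg (show ¬((k : Int) = -1) by omega), hch,
          right_core ch string.toList k hk hmax,
          PySem.List.slice_to_natCast string.toList k,
          show ((k : Int) + 1) = ((k + 1 : Nat) : Int) by omega,
          PySem.List.slice_from_natCast string.toList (k + 1)]
      · -- left: find finds the first occurrence
        have hinf : [ch] <:+: string.toList := (singleton_infix_iff ch _).mpr hmem
        have hnn : 0 ≤ PySem.Chars.find string.toList [ch] :=
          (PySem.Chars.find_nonneg_iff _ _).mpr hinf
        obtain ⟨hp, hmin⟩ := PySem.Chars.find_spec hnn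
        set k := (PySem.Chars.find string.toList [ch]).toNat with hkdef
        have hk : string.toList[k]? = some ch := (singleton_prefix_drop ch _ k).mp hp
        have hminP : ∀ i < k, string.toList[i]? ≠ some ch := fun i hi hsi =>
          hmin i hi ((singleton_prefix_drop ch _ i).mpr hsi)
        have hf : PySem.Str.find string substring = (k : Int) := by
          rw [PySem.Str.find_eq, hch, hkdef, Int.toNat_of_nonneg hnn]
        simp only [if_neg hd, hf]
        rw [if_neg (show ¬((k : Int) = -1) by omega), hch,
          left_core ch string.toList k hk hminP,
          PySem.List.slice_to_natCast string.toList k,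
          show ((k : Int) + 1) = ((k + 1 : Nat) : Int) by omega,
          PySem.List.slice_from_natCast string.toList (k + 1)]
    · -- char absent: both sides leave the string unchanged
      have hno : ∀ s' : List Char, (∀ c ∈ s', c ∈ string.toList) →
          rmFirst [ch] s' = s' := by
        intro s' hsub
        refine rmFirst_of_no_match _ _ (fun c hc heq => ?_)
        have : c = ch := by simpa using heq
        exact hmem (this ▸ hsub c hc)
      have hf1 : PySem.Chars.find string.toList [ch] = -1 :=
        (PySem.Chars.find_eq_neg_one_iff _ _).mpr
          (fun h => hmem ((singleton_infix_iff ch _).mp h))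
      have hrf1 : PySem.Chars.rfind string.toList [ch] = -1 := by
        rw [PySem.Chars.rfind]
        refine rfind_go_neg _ _ _ (fun j _ hp => ?_)
        exact hmem (List.mem_of_getElem? ((singleton_prefix_drop ch _ j).mp hp))
      by_cases hd : direction = "right" <;>
        simp [hd, hch, hf1, hrf1, hno string.toList (fun _ h => h),
          hno string.toList.reverse (by simp), String.ofList_toList]
  · -- |substring| ≠ 1: no char ever matches, B returns the string unchanged
    have hno : ∀ s' : List Char, rmFirst substring.toList s' = s' := fun s' =>
      rmFirst_of_no_match _ _ (fun c _ heq => hlen (by rw [← heq]; rfl))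
    rw [stripper_alt, if_pos (show PySem.Str.len substring ≠ 1 by
      rw [PySem.Str.len_eq]; omega)]
    by_cases hd : direction = "right" <;>
      simp [hd, hno, String.ofList_toList]
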